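-- pv_equiv track=rewrite | github.com/hs-ryu/TIL | python/알고리즘/pro/lev1_옹알이2.py | solution
-- ===== SOURCE A (Python) =====
-- def solution(babbling):
--     answer = 0
--
--     word_set = {"aya", "ye", "woo", "ma"}
--
--     for word in babbling:
--         i = 0
--         good = True
--         past_word = ""
--         while i < len(word):
--             if i + 3 <= len(word):
--                 if word[i:i+3] in word_set:
--                     if past_word == word[i:i+3]:
--                         good = False
--                         break
--                     past_word = word[i:i+3]
--                     i += 3
--                 elif word[i:i+2] in word_set:
--                     if past_word == word[i:i+2]:
--                         good = False
--                         break
--                     past_word = word[i:i+2]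
--                     i += 2
--                 else:
--                     good = False
--                     break
--             elif i + 2 <= len(word):
--                 if word[i:i+2] in word_set:
--                     if past_word == word[i:i+2]:
--                         good = False
--                         break
--                     past_word = word[i:i+2]
--                     i += 2
--                 else:
--                     good = False
--                     break
--             else:
--                 good = False
--                 break
--         if good:
--             answer += 1
--
--     return answer
-- ===== SOURCE B (Python) =====
-- def solution(babbling):
--     table = {"a": "aya", "y": "ye", "w": "woo", "m": "ma"}
--     answer = 0
--     for word in babbling:
--         need = ""   # remaining characters of the syllable being matched
--         cur = ""    # syllable currently being matched
--         last = ""   # previously completed syllable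
--         ok = True
--         for ch in word:
--             if need:
--                 if ch != need[0]:
--                     ok = False
--                     break
--                 need = need[1:]
--                 if not need:
--                     last, cur = cur, ""
--             else:
--                 t = table.get(ch)
--                 if t is None or t == last:
--                     ok = False
--                     break
--                 cur = t
--                 need = t[1:]
--         if ok and not need:
--             answer += 1
--     return answer
-- ===== Notes on version B (the rewrite author's own statement) =====
-- stated objective: alternative
-- what changed: A parses each word with an index-based while loop that slices 3- and 2-character windows and tests them against a set, tracking the previous syllable; B streams each word one character at a time through a small automaton whose state is the unmatched remainder of the current syllable (chosen by a first-character table lookup) plus the previous syllable, so no slicing or set membership is performed.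
import Mathlib
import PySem

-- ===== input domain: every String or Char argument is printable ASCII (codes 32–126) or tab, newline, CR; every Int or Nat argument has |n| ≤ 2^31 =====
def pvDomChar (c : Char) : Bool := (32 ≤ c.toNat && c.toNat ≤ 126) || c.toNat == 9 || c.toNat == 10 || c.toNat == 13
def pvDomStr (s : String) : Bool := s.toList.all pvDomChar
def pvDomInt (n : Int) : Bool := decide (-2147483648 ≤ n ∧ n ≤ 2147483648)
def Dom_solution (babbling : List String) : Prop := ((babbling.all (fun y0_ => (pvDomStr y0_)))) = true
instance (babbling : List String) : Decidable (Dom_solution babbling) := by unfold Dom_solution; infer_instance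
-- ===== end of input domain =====

-- One honest line: B replaces A's slice-and-set-membership index loop by a single
-- character-at-a-time automaton (state = rest of syllable being matched + previous syllable);
-- objective: alternative (different traversal, similar cost).


-- ===== PORT A =====
-- word_set = {"aya", "ye", "woo", "ma"}  (strings handled on the List Char side, per PySem convention)
def pvWordSet : PySem.Set (List Char) :=
  PySem.Set.ofList [['a','y','a'], ['y','e'], ['w','o','o'], ['m','a']]

-- the 'while i < len(word)' loop of A: state (i, past_word); returns the final 'good'
def pvLoopA (w : List Char) (i : Nat) (past : List Char) : Bool :=
  if i < w.length then
    if i + 3 ≤ w.length then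
      if pvWordSet.contains (PySem.List.slice w (some (i : Int)) (some ((i : Int) + 3))) then
        if past = PySem.List.slice w (some (i : Int)) (some ((i : Int) + 3)) then false
        else pvLoopA w (i + 3) (PySem.List.slice w (some (i : Int)) (some ((i : Int) + 3)))
      else if pvWordSet.contains (PySem.List.slice w (some (i : Int)) (some ((i : Int) + 2))) then
        if past = PySem.List.slice w (some (i : Int)) (some ((i : Int) + 2)) then false
        else pvLoopA w (i + 2) (PySem.List.slice w (some (i : Int)) (some ((i : Int) + 2)))
      else false
    else if i + 2 ≤ w.length then
      if pvWordSet.contains (PySem.List.slice w (some (i : Int)) (some ((i : Int) + 2))) then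
        if past = PySem.List.slice w (some (i : Int)) (some ((i : Int) + 2)) then false
        else pvLoopA w (i + 2) (PySem.List.slice w (some (i : Int)) (some ((i : Int) + 2)))
      else false
    else false
  else true
termination_by w.length - i
decreasing_by all_goals omega

def solution (babbling : List String) : Int :=
  babbling.foldl (fun answer word =>
    if pvLoopA word.toList 0 [] then answer + 1 else answer) 0

-- ===== PORT B =====
-- table = {"a": "aya", "y": "ye", "w": "woo", "m": "ma"}
def pvTable : PySem.Dict Char (List Char) :=
  PySem.Dict.ofList [('a', ['a','y','a']), ('y', ['y','e']), ('w', ['w','o','o']), ('m', ['m','a'])]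

-- B's inner 'for ch in word' loop; state (need, cur, last); returns 'ok and not need'
def pvLoopB : List Char → List Char → List Char → List Char → Bool
  | [], need, _cur, _last => need.isEmpty
  | ch :: rest, need, cur, last =>
    match need with
    | n0 :: ntail =>
      if ch ≠ n0 then false
      else if ntail.isEmpty then pvLoopB rest [] [] cur
      else pvLoopB rest ntail cur last
    | [] =>
      match PySem.Dict.get? pvTable ch with
      | none => false
      | some t => if t = last then false else pvLoopB rest (t.drop 1) t last

def solution_alt (babbling : List String) : Int :=
  babbling.foldl (fun answer word =>
    if pvLoopB word.toList [] [] [] then answer + 1 else answer) 0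

-- ===== PRECONDITION & SPEC =====
def Spec_solution (babbling : List String) (out : Int) : Prop := out = solution_alt babbling
instance (babbling : List String) (out : Int) : Decidable (Spec_solution babbling out) := by unfold Spec_solution; infer_instance

-- ===== CLAIM (what is proved, stated in full; the proofs are below) =====
def Claim_equal_solution : Prop := ∀ (babbling : List String), Dom_solution babbling → Spec_solution babbling (solution babbling)

-- ===== LEMMAS AND PROOFS =====

theorem pvSlice3 (w : List Char) (i : Nat) :
    PySem.List.slice w (some (i : Int)) (some ((i : Int) + 3)) = (w.drop i).take 3 := by
  have h := PySem.List.slice_natCast_add w i 3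
  norm_num at h
  exact h

theorem pvSlice2 (w : List Char) (i : Nat) :
    PySem.List.slice w (some (i : Int)) (some ((i : Int) + 2)) = (w.drop i).take 2 := by
  have h := PySem.List.slice_natCast_add w i 2
  norm_num at h
  exact h

theorem pvGet_a : PySem.Dict.get? pvTable 'a' = some ['a','y','a'] := by decide
theorem pvGet_y : PySem.Dict.get? pvTable 'y' = some ['y','e'] := by decide
theorem pvGet_w : PySem.Dict.get? pvTable 'w' = some ['w','o','o'] := by decide
theorem pvGet_m : PySem.Dict.get? pvTable 'm' = some ['m','a'] := by decide
theorem pvGet_none (c : Char) (ha : c ≠ 'a') (hy : c ≠ 'y') (hw : c ≠ 'w') (hm : c ≠ 'm') :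
    PySem.Dict.get? pvTable c = none := by
  have hit : pvTable.items = [('a', ['a','y','a']), ('y', ['y','e']), ('w', ['w','o','o']), ('m', ['m','a'])] := rfl
  have ea : ('a' == c) = false := beq_eq_false_iff_ne.mpr (Ne.symm ha)
  have ey : ('y' == c) = false := beq_eq_false_iff_ne.mpr (Ne.symm hy)
  have ew : ('w' == c) = false := beq_eq_false_iff_ne.mpr (Ne.symm hw)
  have em : ('m' == c) = false := beq_eq_false_iff_ne.mpr (Ne.symm hm)
  simp [PySem.Dict.get?, hit, List.find?, ea, ey, ew, em]

theorem pvKey : ∀ n (w : List Char) (i : Nat) (past : List Char), w.length - i ≤ n →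
    pvLoopA w i past = pvLoopB (w.drop i) [] [] past := by
  intro n
  induction n with
  | zero =>
    intro w i past h
    have hi : ¬ i < w.length := by omega
    rw [pvLoopA]
    simp [hi, List.drop_eq_nil_of_le (by omega : w.length ≤ i), pvLoopB]
  | succ n ih =>
    intro w i past h
    rw [pvLoopA, pvSlice3, pvSlice2]
    by_cases hi : i < w.length
    · simp only [hi, if_true]
      have hlen : (w.drop i).length = w.length - i := by simp
      by_cases h3 : i + 3 ≤ w.length
      · -- at least three characters remain
        obtain ⟨c0, c1, c2, rest, hcs⟩ :
            ∃ c0 c1 c2 rest, w.drop i = c0 :: c1 :: c2 :: rest := by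
          rcases e : w.drop i with _ | ⟨a, _ | ⟨b, _ | ⟨c, r⟩⟩⟩ <;>
            (try exact ⟨a, b, c, r, rfl⟩) <;> (rw [e] at hlen; simp at hlen; omega)
        have hdrop3 : w.drop (i + 3) = rest := by
          have : w.drop (i + 3) = (w.drop i).drop 3 := by
            rw [List.drop_drop]
          rw [this, hcs]; rfl
        have hdrop2 : w.drop (i + 2) = c2 :: rest := by
          have : w.drop (i + 2) = (w.drop i).drop 2 := by
            rw [List.drop_drop]
          rw [this, hcs]; rfl
        rw [hcs]
        simp only [h3, if_true, List.take]
        by_cases pA : c0 = 'a' ∧ c1 = 'y' ∧ c2 = 'a'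
        · obtain ⟨rfl, rfl, rfl⟩ := pA
          rw [ih w (i + 3) _ (by omega), hdrop3]
          by_cases hp : past = ['a', 'y', 'a']
          · simp [pvLoopB, pvGet_a, hp, pvWordSet]
          · have hp' : ¬ (['a', 'y', 'a'] = past) := fun hc => hp hc.symm
            simp [pvLoopB, pvGet_a, hp, hp', pvWordSet]
        · by_cases pW : c0 = 'w' ∧ c1 = 'o' ∧ c2 = 'o'
          · obtain ⟨rfl, rfl, rfl⟩ := pW
            rw [ih w (i + 3) _ (by omega), hdrop3]
            by_cases hp : past = ['w', 'o', 'o']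
            · simp [pvLoopB, pvGet_w, hp, pvWordSet]
            · have hp' : ¬ (['w', 'o', 'o'] = past) := fun hc => hp hc.symm
              simp [pvLoopB, pvGet_w, hp, hp', pvWordSet]
          · by_cases pY : c0 = 'y' ∧ c1 = 'e'
            · obtain ⟨rfl, rfl⟩ := pY
              rw [ih w (i + 2) _ (by omega), hdrop2]
              by_cases hp : past = ['y', 'e']
              · simp [pvLoopB, pvGet_y, hp, pvWordSet]
              · have hp' : ¬ (['y', 'e'] = past) := fun hc => hp hc.symm
                simp [pvLoopB, pvGet_y, hp, hp', pvWordSet]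
            · by_cases pM : c0 = 'm' ∧ c1 = 'a'
              · obtain ⟨rfl, rfl⟩ := pM
                rw [ih w (i + 2) _ (by omega), hdrop2]
                by_cases hp : past = ['m', 'a']
                · simp [pvLoopB, pvGet_m, hp, pvWordSet]
                · have hp' : ¬ (['m', 'a'] = past) := fun hc => hp hc.symm
                  simp [pvLoopB, pvGet_m, hp, hp', pvWordSet]
              · -- no syllable matches here: both sides fail
                have hA : pvWordSet.contains [c0, c1, c2] = false := by
                  simp [pvWordSet, PySem.Set.ofList]
                  refine ⟨?_, ?_⟩ <;> intro e1 e2 e3 <;> simp_all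
                have hA2 : pvWordSet.contains [c0, c1] = false := by
                  simp [pvWordSet, PySem.Set.ofList]
                  refine ⟨?_, ?_⟩ <;> intro e1 e2 <;> simp_all
                rw [hA, hA2]
                simp only [Bool.false_eq_true, if_false]
                by_cases a0 : c0 = 'a'
                · subst a0
                  by_cases a1 : c1 = 'y'
                  · subst a1
                    have : c2 ≠ 'a' := fun hc => pA ⟨rfl, rfl, hc⟩
                    simp [pvLoopB, pvGet_a, this]
                  · simp [pvLoopB, pvGet_a, a1]
                · by_cases w0 : c0 = 'w'
                  · subst w0
                    by_cases w1 : c1 = 'o'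
                    · subst w1
                      have : c2 ≠ 'o' := fun hc => pW ⟨rfl, rfl, hc⟩
                      simp [pvLoopB, pvGet_w, this]
                    · simp [pvLoopB, pvGet_w, w1]
                  · by_cases y0 : c0 = 'y'
                    · subst y0
                      have : c1 ≠ 'e' := fun hc => pY ⟨rfl, hc⟩
                      simp [pvLoopB, pvGet_y, this]
                    · by_cases m0 : c0 = 'm'
                      · subst m0
                        have : c1 ≠ 'a' := fun hc => pM ⟨rfl, hc⟩
                        simp [pvLoopB, pvGet_m, this]
                      · simp only [pvLoopB]
                        rw [pvGet_none c0 a0 y0 w0 m0]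
      · by_cases h2 : i + 2 ≤ w.length
        · -- exactly two characters remain
          obtain ⟨c0, c1, hcs⟩ : ∃ c0 c1, w.drop i = [c0, c1] := by
            rcases e : w.drop i with _ | ⟨a, _ | ⟨b, _ | ⟨c, r⟩⟩⟩ <;>
              (try exact ⟨a, b, rfl⟩) <;> (rw [e] at hlen; simp at hlen; omega)
          have hdrop2 : w.drop (i + 2) = [] := by
            have : w.drop (i + 2) = (w.drop i).drop 2 := by
              rw [List.drop_drop]
            rw [this, hcs]
            rfl
          rw [hcs]
          simp only [h3, if_false, h2, if_true, List.take]
          by_cases pY : c0 = 'y' ∧ c1 = 'e'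
          · obtain ⟨rfl, rfl⟩ := pY
            rw [ih w (i + 2) _ (by omega), hdrop2]
            by_cases hp : past = ['y', 'e']
            · simp [pvLoopB, pvGet_y, hp, pvWordSet]
            · have hp' : ¬ (['y', 'e'] = past) := fun hc => hp hc.symm
              simp [pvLoopB, pvGet_y, hp, hp', pvWordSet]
          · by_cases pM : c0 = 'm' ∧ c1 = 'a'
            · obtain ⟨rfl, rfl⟩ := pM
              rw [ih w (i + 2) _ (by omega), hdrop2]
              by_cases hp : past = ['m', 'a']
              · simp [pvLoopB, pvGet_m, hp, pvWordSet]
              · have hp' : ¬ (['m', 'a'] = past) := fun hc => hp hc.symm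
                simp [pvLoopB, pvGet_m, hp, hp', pvWordSet]
            · have hA2 : pvWordSet.contains [c0, c1] = false := by
                simp [pvWordSet, PySem.Set.ofList]
                refine ⟨?_, ?_⟩ <;> intro e1 e2 <;> simp_all
              rw [hA2]
              simp only [Bool.false_eq_true, if_false]
              by_cases a0 : c0 = 'a'
              · subst a0
                by_cases a1 : c1 = 'y' <;> simp [pvLoopB, pvGet_a, a1]
              · by_cases w0 : c0 = 'w'
                · subst w0
                  by_cases w1 : c1 = 'o' <;> simp [pvLoopB, pvGet_w, w1]
                · by_cases y0 : c0 = 'y'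
                  · subst y0
                    have : c1 ≠ 'e' := fun hc => pY ⟨rfl, hc⟩
                    simp [pvLoopB, pvGet_y, this]
                  · by_cases m0 : c0 = 'm'
                    · subst m0
                      have : c1 ≠ 'a' := fun hc => pM ⟨rfl, hc⟩
                      simp [pvLoopB, pvGet_m, this]
                    · simp only [pvLoopB]
                      rw [pvGet_none c0 a0 y0 w0 m0]
        · -- exactly one character remains
          obtain ⟨c0, hcs⟩ : ∃ c0, w.drop i = [c0] := by
            rcases e : w.drop i with _ | ⟨a, _ | ⟨b, r⟩⟩ <;>
              (try exact ⟨a, rfl⟩) <;> (rw [e] at hlen; simp at hlen; omega)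
          rw [hcs]
          simp only [h3, if_false, h2]
          by_cases a0 : c0 = 'a'
          · simp [pvLoopB, pvGet_a, a0]
          · by_cases w0 : c0 = 'w'
            · simp [pvLoopB, pvGet_w, w0]
            · by_cases y0 : c0 = 'y'
              · simp [pvLoopB, pvGet_y, y0]
              · by_cases m0 : c0 = 'm'
                · simp [pvLoopB, pvGet_m, m0]
                · simp only [pvLoopB]
                  rw [pvGet_none c0 a0 y0 w0 m0]
    · have : w.length ≤ i := by omega
      simp [hi, List.drop_eq_nil_of_le this, pvLoopB]

theorem pvWord (w : List Char) : pvLoopA w 0 [] = pvLoopB w [] [] [] := by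
  simpa using pvKey w.length w 0 [] (by omega)

-- ===== VERDICT (by name: the statement is the Claim_ definition above) =====
theorem solution_spec : Claim_equal_solution := by
  intro babbling _
  unfold Spec_solution solution solution_alt
  exact PySem.List.foldl_congr_mem babbling _ _ 0 (fun acc w _ => by rw [pvWord])
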